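-- pv_equiv track=rewrite | github.com/wikty/CLib | source.py | longest_same_item_in_sorted_list
-- ===== SOURCE A (Python) =====
-- def longest_same_item_in_sorted_list(lst):
--     lst = sorted(lst)  # make sure lst is sorted
--     longest = 0
--     last = 0
--     for i,item in enumerate(lst):
--         if lst[i-longest] == item:
--             longest += 1
--             last = i
--     return (last-longest+1, longest)
-- ===== SOURCE B (Python) =====
-- def longest_same_item_in_sorted_list(lst):
--     best_len = 0
--     best_end = 0
--     cur = 0
--     prev = None
--     for i, x in enumerate(sorted(lst)):
--         cur = cur + 1 if prev == x else 1
--         if cur > best_len: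
--             best_len = cur
--             best_end = i
--         prev = x
--     return (best_end - best_len + 1, best_len)
-- ===== Notes on version B (the rewrite author's own statement) =====
-- stated objective: alternative
-- what changed: Replaces A's back-indexing trick (comparing lst[i-longest] to the current item) with an explicit run-length scan that tracks the previous element, the current run length and the best (length, end index) with a strict '>' so the earliest longest run wins.
import Mathlib
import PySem

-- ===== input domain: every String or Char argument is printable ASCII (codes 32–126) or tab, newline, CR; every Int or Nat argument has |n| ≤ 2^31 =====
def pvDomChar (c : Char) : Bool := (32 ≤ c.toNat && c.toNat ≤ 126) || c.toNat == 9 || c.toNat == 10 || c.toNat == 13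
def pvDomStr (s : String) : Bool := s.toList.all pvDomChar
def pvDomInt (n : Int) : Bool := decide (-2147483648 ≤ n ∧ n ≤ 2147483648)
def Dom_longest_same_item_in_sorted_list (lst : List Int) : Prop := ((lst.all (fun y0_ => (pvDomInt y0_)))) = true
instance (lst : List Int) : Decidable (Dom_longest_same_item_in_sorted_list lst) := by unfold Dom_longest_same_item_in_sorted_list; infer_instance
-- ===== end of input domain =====

-- B replaces A's back-index trick (lst[i-longest] == item) by an explicit current-run
-- counter compared against the previous element, keeping the earliest best run; objective: simpler.

-- ===== PORT A =====
-- A sorts, then for each (i, item) checks lst[i-longest] == item; on success longest += 1, last = i.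
def longest_same_item_in_sorted_list (lst : List Int) : Int × Int :=
  let s := PySem.List.sorted lst (fun x => x) false
  let st := (PySem.List.enumerate s 0).foldl
    (fun (st : Int × Int) (p : Int × Int) =>
      if PySem.List.pyGet? s (p.1 - st.1) = some p.2 then (st.1 + 1, p.1) else st)
    (0, 0)
  (st.2 - st.1 + 1, st.1)

-- ===== PORT B =====
-- B sorts, then scans once keeping (prev, cur, best_len, best_end); state order matches Source B.
def longest_same_item_in_sorted_list_alt (lst : List Int) : Int × Int :=
  let st := (PySem.List.enumerate (PySem.List.sorted lst (fun x => x) false) 0).foldl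
    (fun (st : Option Int × Int × Int × Int) (p : Int × Int) =>
      let cur := if st.1 = some p.2 then st.2.1 + 1 else 1
      if cur > st.2.2.1 then (some p.2, cur, cur, p.1)
      else (some p.2, cur, st.2.2.1, st.2.2.2))
    (none, 0, 0, 0)
  (st.2.2.2 - st.2.2.1 + 1, st.2.2.1)

-- ===== PRECONDITION & SPEC =====
def Spec_longest_same_item_in_sorted_list (lst : List Int) (out : Int × Int) : Prop := out = longest_same_item_in_sorted_list_alt lst
instance (lst : List Int) (out : Int × Int) : Decidable (Spec_longest_same_item_in_sorted_list lst out) := by unfold Spec_longest_same_item_in_sorted_list; infer_instance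

-- ===== CLAIM (what is proved, stated in full; the proofs are below) =====
def Claim_equal_longest_same_item_in_sorted_list : Prop := ∀ (lst : List Int), Dom_longest_same_item_in_sorted_list lst → Spec_longest_same_item_in_sorted_list lst (longest_same_item_in_sorted_list lst)

-- ===== LEMMAS AND PROOFS =====

-- The synchronized loop invariant: over a sorted list s, A's fold from state (ℓ, be)
-- and B's fold from state (prev, cur, ℓ, be) stay in lock-step, where prev is the
-- previous element, cur the length of the current equal run ending just before i,
-- ℓ the best run length so far and be the end index of the earliest best run.
theorem pv_sync (s : List Int)
    (hs : ∀ (a b : Nat) (ha : a < s.length) (hb : b < s.length), a ≤ b → s[a] ≤ s[b]) :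
    ∀ (t : List Int) (i ℓ cur be : Nat) (prev : Option Int),
      s.drop i = t → i ≤ s.length →
      ℓ ≤ i → cur ≤ ℓ →
      prev = (if i = 0 then none else s[i-1]?) →
      (∀ j, i - cur ≤ j → j < i → s[j]? = s[i-1]?) →
      (cur < i → s[i-cur-1]? ≠ s[i-1]?) →
      ((PySem.List.enumerate t (i : Int)).foldl
        (fun (st : Int × Int) (p : Int × Int) =>
          if PySem.List.pyGet? s (p.1 - st.1) = some p.2 then (st.1 + 1, p.1) else st)
        ((ℓ : Int), (be : Int)))
      = (((PySem.List.enumerate t (i : Int)).foldl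
          (fun (st : Option Int × Int × Int × Int) (p : Int × Int) =>
            let cur := if st.1 = some p.2 then st.2.1 + 1 else 1
            if cur > st.2.2.1 then (some p.2, cur, cur, p.1)
            else (some p.2, cur, st.2.2.1, st.2.2.2))
          (prev, (cur : Int), (ℓ : Int), (be : Int))).2.2.1,
         ((PySem.List.enumerate t (i : Int)).foldl
          (fun (st : Option Int × Int × Int × Int) (p : Int × Int) =>
            let cur := if st.1 = some p.2 then st.2.1 + 1 else 1
            if cur > st.2.2.1 then (some p.2, cur, cur, p.1)
            else (some p.2, cur, st.2.2.1, st.2.2.2))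
          (prev, (cur : Int), (ℓ : Int), (be : Int))).2.2.2) := by
  intro t
  induction t with
  | nil =>
    intro i ℓ cur be prev _ _ _ _ _ _ _
    simp [PySem.List.enumerate_nil]
  | cons x t' ih =>
    intro i ℓ cur be prev hdrop hilen hℓi hcurℓ hprev hrun hmax
    have hlen : i < s.length := by
      by_contra h
      have hnil : s.drop i = [] := List.drop_eq_nil_of_le (by omega)
      rw [hdrop] at hnil; simp at hnil
    have hdrop1 : s.drop (i+1) = t' := by
      have h1 : s.drop (i+1) = (s.drop i).drop 1 := by rw [List.drop_drop]
      rw [h1, hdrop, List.drop_one, List.tail_cons]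
    have hxe : s[i]? = some x := by
      have h0 : (s.drop i)[0]? = some x := by rw [hdrop]; rfl
      rwa [List.getElem?_drop, Nat.add_zero] at h0
    have hxv : s[i] = x := by
      rw [List.getElem?_eq_getElem hlen] at hxe; exact Option.some.inj hxe
    have hcast : (i : Int) - (ℓ : Int) = ((i - ℓ : Nat) : Int) := by omega
    simp only [PySem.List.enumerate_cons, List.foldl_cons, hcast, PySem.List.pyGet?_natCast]
    rcases Nat.eq_zero_or_pos i with hi0 | hipos
    · -- first element: both sides record a run of length 1 ending at 0
      subst hi0
      have hℓ0 : ℓ = 0 := by omega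
      have hc0 : cur = 0 := by omega
      subst hℓ0; subst hc0
      have hprev' : prev = none := by simpa using hprev
      subst hprev'
      have hA0 : s[0-0]? = some x := by simpa using hxe
      have H := ih 1 1 1 0 (some x) hdrop1 (by omega) (by omega) (by omega)
        (by simpa using hxe.symm)
        (by intro j h1 h2
            have hj : j = 0 := by omega
            subst hj; rfl)
        (by intro h; omega)
      split_ifs <;> first
        | simpa using H
        | omega
        | simp_all
    · -- i > 0: previous element exists
      have hy : s[i-1]? = some (s[i-1]'(by omega)) := List.getElem?_eq_getElem (by omega)
      have hprev' : prev = some (s[i-1]'(by omega)) := by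
        rw [hprev, if_neg (by omega), hy]
      by_cases hyx : s[i-1]'(by omega) = x
      · -- the run continues through position i
        have hsx : prev = some x := by rw [hprev', hyx]
        rcases Nat.lt_or_ge cur ℓ with hcl | hcl
        · -- current run stays shorter than the best: neither side updates
          have hcuri : cur < i := by omega
          have hbne : s[i-cur-1]'(by omega) ≠ s[i-1]'(by omega) := by
            intro h
            apply hmax hcuri
            rw [List.getElem?_eq_getElem (by omega), List.getElem?_eq_getElem (by omega), h]
          have h1 : s[i-ℓ]'(by omega) ≤ s[i-cur-1]'(by omega) :=
            hs _ _ (by omega) (by omega) (by omega)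
          have h2 : s[i-cur-1]'(by omega) ≤ s[i-1]'(by omega) :=
            hs _ _ (by omega) (by omega) (by omega)
          have hAne : ¬ (s[i-ℓ]? = some x) := by
            rw [List.getElem?_eq_getElem (by omega)]
            intro h
            have hlt : s[i-ℓ]'(by omega) < s[i-1]'(by omega) :=
              lt_of_le_of_lt h1 (lt_of_le_of_ne h2 hbne)
            rw [hyx] at hlt
            exact absurd (Option.some.inj h) (ne_of_lt hlt)
          have H := ih (i+1) ℓ (cur+1) be (some x) hdrop1 (by omega) (by omega) (by omega)
            (by rw [if_neg (by omega)]; simp [hxe])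
            (by intro j hj1 hj2
                rcases Nat.lt_or_ge j i with hji | hji
                · have hj := hrun j (by omega) hji
                  simpa [hxe] using hj.trans (by rw [hy, hyx])
                · have hj : j = i := by omega
                  subst hj; simp)
            (by intro _
                have h := hmax hcuri
                simp only [Nat.add_sub_cancel]
                intro hcon
                apply h
                rw [show i + 1 - (cur+1) - 1 = i - cur - 1 by omega] at hcon
                rw [hcon, hxe, hy, hyx])
          split_ifs <;> first
            | simpa using H
            | omega
            | simp_all
        · -- current run catches the best: both sides fire, end index moves to i
          have hce : cur = ℓ := by omega
          have hApos : s[i-ℓ]? = some x := by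
            rcases Nat.eq_zero_or_pos ℓ with hl0 | hlpos
            · rw [hl0]; simpa using hxe
            · have hj := hrun (i-ℓ) (by omega) (by omega)
              rw [hj, hy, hyx]
          have H := ih (i+1) (ℓ+1) (ℓ+1) i (some x) hdrop1 (by omega) (by omega) (by omega)
            (by rw [if_neg (by omega)]; simp [hxe])
            (by intro j hj1 hj2
                rcases Nat.lt_or_ge j i with hji | hji
                · have hj := hrun j (by omega) hji
                  simpa [hxe] using hj.trans (by rw [hy, hyx])
                · have hj : j = i := by omega
                  subst hj; simp)
            (by intro hlt
                have hcuri : cur < i := by omega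
                have h := hmax hcuri
                simp only [Nat.add_sub_cancel]
                intro hcon
                apply h
                rw [show i + 1 - (ℓ+1) - 1 = i - cur - 1 by omega] at hcon
                rw [hcon, hxe, hy, hyx])
          split_ifs <;> first
            | simpa [hce] using H
            | omega
            | simp_all
      · -- a new value: the current run restarts at length 1
        have hsx : ¬ (prev = some x) := by
          rw [hprev']
          intro h; exact hyx (Option.some.inj h)
        rcases Nat.eq_zero_or_pos ℓ with hℓ0 | hℓpos
        · -- best still 0 (so this is reachable only with cur = 0): both fire
          subst hℓ0
          have hc0 : cur = 0 := by omega
          subst hc0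
          have hA0 : s[i-0]? = some x := by simpa using hxe
          have H := ih (i+1) 1 1 i (some x) hdrop1 (by omega) (by omega) (by omega)
            (by rw [if_neg (by omega)]; simp [hxe])
            (by intro j hj1 hj2
                have hj : j = i := by omega
                subst hj; simp)
            (by intro _
                simp only [Nat.add_sub_cancel]
                rw [hxe, hy]
                intro hcon; exact hyx (Option.some.inj hcon))
          split_ifs <;> first
            | simpa using H
            | omega
            | simp_all
        · -- best positive: neither side updates
          have h1 : s[i-ℓ]'(by omega) ≤ s[i-1]'(by omega) :=
            hs _ _ (by omega) (by omega) (by omega)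
          have h2 : s[i-1]'(by omega) ≤ s[i]'(by omega) :=
            hs _ _ (by omega) (by omega) (by omega)
          have hAne : ¬ (s[i-ℓ]? = some x) := by
            rw [List.getElem?_eq_getElem (by omega)]
            intro h
            rw [hxv] at h2
            have hlt : s[i-ℓ]'(by omega) < x :=
              lt_of_le_of_lt h1 (lt_of_le_of_ne h2 hyx)
            exact absurd (Option.some.inj h) (ne_of_lt hlt)
          have H := ih (i+1) ℓ 1 be (some x) hdrop1 (by omega) (by omega) (by omega)
            (by rw [if_neg (by omega)]; simp [hxe])
            (by intro j hj1 hj2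
                have hj : j = i := by omega
                subst hj; simp)
            (by intro _
                simp only [Nat.add_sub_cancel]
                rw [hxe, hy]
                intro hcon; exact hyx (Option.some.inj hcon))
          split_ifs <;> first
            | simpa using H
            | omega
            | simp_all

-- ===== VERDICT (by name: the statement is the Claim_ definition above) =====
theorem longest_same_item_in_sorted_list_spec : Claim_equal_longest_same_item_in_sorted_list := by
  intro lst _
  unfold Spec_longest_same_item_in_sorted_list
  unfold longest_same_item_in_sorted_list longest_same_item_in_sorted_list_alt
  set s := PySem.List.sorted lst (fun x => x) false with hsdef
  have hpw : s.Pairwise (· ≤ ·) := PySem.List.sorted_pairwise lst (fun x => x)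
  have hs : ∀ (a b : Nat) (ha : a < s.length) (hb : b < s.length), a ≤ b → s[a] ≤ s[b] := by
    intro a b ha hb hab
    rcases Nat.lt_or_ge a b with h | h
    · exact (List.pairwise_iff_getElem.mp hpw) a b ha hb h
    · have : a = b := le_antisymm hab h
      subst this; exact le_refl _
  have := pv_sync s hs s 0 0 0 0 none (by simp) (by simp) (by simp) (by simp)
    (by simp) (by intro j h1 h2; omega) (by intro h; omega)
  simp only [Nat.cast_zero] at this
  exact congrArg (fun st : Int × Int => (st.2 - st.1 + 1, st.1)) this
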